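-- pv_equiv track=rewrite | github.com/unabl4/AoC | 2018/day2/part1/ims.py | twos_threes
-- ===== SOURCE A (Python) =====
-- def twos_threes(input):
--     f = {}
--     for c in input:
--         f[c] = f.get(c,0)+1
--
--     twos = threes = 0
--     for v in f.values():
--         if v == 2: # exactly two times
--             twos = 1
--
--         if v == 3: # exactly three times
--             threes = 1
--
--     return (twos, threes)
-- ===== SOURCE B (Python) =====
-- def twos_threes(input):
--     s = sorted(input)
--     twos = threes = 0
--     i = 0
--     n = len(s)
--     while i < n:
--         j = i
--         while j < n and s[j] == s[i]:
--             j += 1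
--         run = j - i
--         if run == 2:
--             twos = 1
--         if run == 3:
--             threes = 1
--         i = j
--     return (twos, threes)
-- ===== Notes on version B (the rewrite author's own statement) =====
-- stated objective: alternative
-- what changed: Replaces the hash-counter (dict of frequencies plus a flag loop over its values) by a sort-then-scan-runs strategy: sort the characters, walk the sorted sequence measuring the length of each run of equal characters, and set the flags when a run has length 2 or 3.
import Mathlib
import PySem

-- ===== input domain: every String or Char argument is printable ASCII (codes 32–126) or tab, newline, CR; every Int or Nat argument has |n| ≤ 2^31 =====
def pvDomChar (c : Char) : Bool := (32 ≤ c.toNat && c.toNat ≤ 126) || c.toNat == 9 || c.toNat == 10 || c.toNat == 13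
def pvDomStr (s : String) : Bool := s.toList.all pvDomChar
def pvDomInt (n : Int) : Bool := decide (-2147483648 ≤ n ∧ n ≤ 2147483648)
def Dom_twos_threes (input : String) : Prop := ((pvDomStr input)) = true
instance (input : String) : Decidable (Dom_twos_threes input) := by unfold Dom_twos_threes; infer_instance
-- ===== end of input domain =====

-- B replaces A's dict-counter + flag loop by sorting the characters and scanning runs of equal
-- characters, flagging run lengths 2 and 3; a different algorithm of similar cost, not claimed faster.

-- ===== PORT A =====
-- f = {}; for c in input: f[c] = f.get(c,0)+1 ; then scan f.values() setting the flags.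
def twos_threes (input : String) : Int × Int :=
  let f := input.toList.foldl (fun d c => d.insert c (d.getD c 0 + 1)) (PySem.Dict.empty : PySem.Dict Char Int)
  f.values.foldl
    (fun (acc : Int × Int) v =>
      let acc := if v = 2 then (1, acc.2) else acc
      if v = 3 then (acc.1, 1) else acc)
    (0, 0)

-- ===== PORT B =====
-- the inner while 'while j < n and s[j] == s[i]: j += 1' measures the current run:
-- structurally it is takeWhile/dropWhile of the head's equality class; the outer while is
-- the recursion runLengths over the remaining suffix.
def runLengths (l : List Char) : List Int :=
  match l with
  | [] => []
  | c :: t => ((t.takeWhile (fun d => d = c)).length + 1 : Int) :: runLengths (t.dropWhile (fun d => d = c))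
termination_by l.length
decreasing_by
  simp only [List.length_cons]
  exact Nat.lt_succ_of_le (t.length_dropWhile_le _)

def twos_threes_alt (input : String) : Int × Int :=
  let s := PySem.List.sorted input.toList (fun c => c) false
  let rs := runLengths s
  (if 2 ∈ rs then 1 else 0, if 3 ∈ rs then 1 else 0)

-- ===== PRECONDITION & SPEC =====
def Spec_twos_threes (input : String) (out : Int × Int) : Prop := out = twos_threes_alt input
instance (input : String) (out : Int × Int) : Decidable (Spec_twos_threes input out) := by unfold Spec_twos_threes; infer_instance

-- ===== CLAIM (what is proved, stated in full; the proofs are below) =====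
def Claim_equal_twos_threes : Prop := ∀ (input : String), Dom_twos_threes input → Spec_twos_threes input (twos_threes input)

-- ===== LEMMAS AND PROOFS =====

-- A's flag loop (in the zeta-reduced shape of the port): a flag ends 1 iff it started 1 or its value occurs.
theorem pv_flag_loop (vs : List Int) (t h : Int) :
    vs.foldl
      (fun (acc : Int × Int) v =>
        if v = 3 then ((if v = 2 then (1, acc.2) else acc).1, 1)
        else if v = 2 then (1, acc.2) else acc)
      (t, h)
    = ((if 2 ∈ vs then 1 else t), (if 3 ∈ vs then 1 else h)) := by
  induction vs generalizing t h with
  | nil => simp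
  | cons v vs ih =>
    simp only [List.foldl_cons, List.mem_cons]
    by_cases h2 : (2 : Int) = v
    · subst h2; simp [ih]
    · by_cases h3 : (3 : Int) = v
      · subst h3; simp [ih]
      · have hv2 : ¬ v = 2 := fun h => h2 h.symm
        have hv3 : ¬ v = 3 := fun h => h3 h.symm
        simp [h2, h3, hv2, hv3, ih]

-- membership in A's dict-value list = existence of a character with that count
theorem pv_mem_values (cs : List Char) (n : Int) :
    (n ∈ ((PySem.Dict.counter cs).values) ↔ ∃ c ∈ cs, (cs.count c : Int) = n) := by
  simp [PySem.Dict.values, PySem.Dict.items_counter, List.map_map, Function.comp,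
    PySem.Set.mem_ofList]

-- run lengths of a ≤-sorted list are exactly the multiplicities of its members
theorem pv_mem_runLengths (l : List Char) (hs : l.Pairwise (· ≤ ·)) (n : Int) :
    n ∈ runLengths l ↔ ∃ c ∈ l, (l.count c : Int) = n := by
  induction l using runLengths.induct with
  | case1 => simp [runLengths]
  | case2 c t ih =>
    have hle : ∀ d ∈ t, c ≤ d := (List.pairwise_cons.1 hs).1
    have hs' : t.Pairwise (· ≤ ·) := (List.pairwise_cons.1 hs).2
    have hsd : (t.dropWhile (fun d => d = c)).Pairwise (· ≤ ·) :=
      hs'.sublist (t.dropWhile_sublist _)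
    -- c does not occur in the dropWhile part
    have hnc : c ∉ t.dropWhile (fun d => d = c) := by
      intro hmem
      rcases hd : t.dropWhile (fun d => d = c) with _ | ⟨d, r⟩
      · simp [hd] at hmem
      · have hdne : ¬ (d = c) := by
          have := List.head?_dropWhile_not (p := fun d => decide (d = c)) t
          simp [hd] at this; exact this
        have hsub := t.dropWhile_sublist (fun d => decide (d = c))
        rw [hd] at hsub
        have hdpw : (d :: r).Pairwise (· ≤ ·) := hs'.sublist hsub
        have hcd : c ≤ d := hle d (hsub.mem (by simp))
        rw [hd] at hmem
        rcases List.mem_cons.1 hmem with h | h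
        · exact hdne h.symm
        · have hdc : d ≤ c := (List.pairwise_cons.1 hdpw).1 c h
          exact hdne (le_antisymm hdc hcd)
    -- every element of the takeWhile part is c
    have htk : ∀ d ∈ t.takeWhile (fun d => d = c), d = c := by
      intro d hd
      have := List.mem_takeWhile_imp hd
      simpa using this
    have hsplit : (c :: t.takeWhile (fun d => d = c)) ++ t.dropWhile (fun d => d = c) = c :: t := by
      simp [List.takeWhile_append_dropWhile]
    -- counts across the split
    have hcount : ∀ e : Char, (c :: t).count e
        = (c :: t.takeWhile (fun d => d = c)).count e + (t.dropWhile (fun d => d = c)).count e := by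
      intro e; rw [← hsplit, List.count_append]
    have hcount_c : (c :: t).count c = (t.takeWhile (fun d => d = c)).length + 1 := by
      rw [hcount c]
      have h1 : (c :: t.takeWhile (fun d => d = c)).count c
          = (t.takeWhile (fun d => d = c)).length + 1 := by
        simp only [List.count_cons]
        rw [List.count_eq_length.2 (fun d hd => by simp [htk d hd])]
        simp
      have h2 : (t.dropWhile (fun d => d = c)).count c = 0 :=
        List.count_eq_zero.2 hnc
      omega
    have hcount_ne : ∀ e : Char, e ≠ c →
        (c :: t).count e = (t.dropWhile (fun d => d = c)).count e := by
      intro e he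
      rw [hcount e]
      have : (c :: t.takeWhile (fun d => d = c)).count e = 0 := by
        refine List.count_eq_zero.2 ?_
        intro hmem
        rcases List.mem_cons.1 hmem with h | h
        · exact he h
        · exact he (htk e h)
      omega
    rw [runLengths]
    constructor
    · intro hmem
      rcases List.mem_cons.1 hmem with h | h
      · exact ⟨c, by simp, by rw [hcount_c]; push_cast; omega⟩
      · rcases (ih hsd).1 h with ⟨e, he, hce⟩
        have hec : e ≠ c := fun h' => hnc (h' ▸ he)
        refine ⟨e, ?_, ?_⟩
        · exact List.mem_cons.2 (Or.inr ((t.dropWhile_sublist _).mem he))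
        · rw [hcount_ne e hec]; exact hce
    · rintro ⟨e, he, hce⟩
      by_cases hec : e = c
      · subst hec
        apply List.mem_cons.2; left
        rw [hcount_c] at hce; push_cast at hce ⊢; omega
      · apply List.mem_cons.2; right
        refine (ih hsd).2 ⟨e, ?_, ?_⟩
        · -- e ∈ dropWhile: e ∈ c::t, e ≠ c, e not in takeWhile
          rcases List.mem_cons.1 he with h | h
          · exact absurd h hec
          · have : e ∈ t.takeWhile (fun d => d = c) ∨ e ∈ t.dropWhile (fun d => d = c) := by
              have := (List.takeWhile_append_dropWhile (p := fun d => decide (d = c)) (l := t))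
              rw [← this] at h
              simpa using List.mem_append.1 h
            rcases this with h' | h'
            · exact absurd (htk e h') hec
            · exact h'
        · rw [← hcount_ne e hec]; exact hce

-- ===== VERDICT (by name: the statement is the Claim_ definition above) =====
theorem twos_threes_spec : Claim_equal_twos_threes := by
  intro input _
  unfold Spec_twos_threes twos_threes twos_threes_alt
  dsimp only
  simp only [PySem.Dict.foldl_insert_getD_add_one_eq_counter]
  rw [pv_flag_loop]
  have hperm : (PySem.List.sorted input.toList (fun c => c) false).Perm input.toList :=
    PySem.List.sorted_perm _ _ _
  have hpw : (PySem.List.sorted input.toList (fun c => c) false).Pairwise (· ≤ ·) :=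
    PySem.List.sorted_pairwise _ _
  have hmem : ∀ n : Int, n ∈ runLengths (PySem.List.sorted input.toList (fun c => c) false)
      ↔ n ∈ (PySem.Dict.counter input.toList).values := by
    intro n
    rw [pv_mem_runLengths _ hpw, pv_mem_values]
    constructor
    · rintro ⟨c, hc, hcc⟩
      exact ⟨c, hperm.mem_iff.1 hc, by rw [← hperm.count_eq]; exact hcc⟩
    · rintro ⟨c, hc, hcc⟩
      exact ⟨c, hperm.mem_iff.2 hc, by rw [hperm.count_eq]; exact hcc⟩
  simp only [hmem]
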